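-- pv_equiv track=rewrite | github.com/lichen2018/LEMON | Scripts/reconstruct_HGT_strain.py | getHarborNameOfSeq
-- ===== SOURCE A (Python) =====
-- def getHarborNameOfSeq(hgt_seq_dict):
--     harbor2seq_dict = {}
--     seq2harbor_dict = {}
--     for seq_name in hgt_seq_dict:
--         seq2harbor_dict.update({seq_name:hgt_seq_dict[seq_name][0][0]})
--     harbor_name_list = []
--     for seq_name in seq2harbor_dict:
--         if seq2harbor_dict[seq_name] not in harbor_name_list:
--             harbor_name_list.append(seq2harbor_dict[seq_name])
--     for harbor_name in harbor_name_list: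
--         ls = []
--         for seq_name in seq2harbor_dict:
--             if seq2harbor_dict[seq_name] == harbor_name:
--                 ls.append(seq_name)
--         harbor2seq_dict.update({harbor_name:ls})
--     return seq2harbor_dict, harbor2seq_dict
-- ===== SOURCE B (Python) =====
-- def getHarborNameOfSeq(hgt_seq_dict):
--     seq2harbor_dict = {}
--     harbor2seq_dict = {}
--     for seq_name, value in hgt_seq_dict.items():
--         harbor = value[0][0]
--         seq2harbor_dict[seq_name] = harbor
--         harbor2seq_dict.setdefault(harbor, []).append(seq_name)
--     return seq2harbor_dict, harbor2seq_dict
-- ===== Notes on version B (the rewrite author's own statement) =====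
-- stated objective: faster
-- what changed: One single pass over the dict building both maps at once, grouping via setdefault, instead of one pass to map seq->harbor, a dedup pass over it, and a full rescan of the whole map per distinct harbor.
import Mathlib
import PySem

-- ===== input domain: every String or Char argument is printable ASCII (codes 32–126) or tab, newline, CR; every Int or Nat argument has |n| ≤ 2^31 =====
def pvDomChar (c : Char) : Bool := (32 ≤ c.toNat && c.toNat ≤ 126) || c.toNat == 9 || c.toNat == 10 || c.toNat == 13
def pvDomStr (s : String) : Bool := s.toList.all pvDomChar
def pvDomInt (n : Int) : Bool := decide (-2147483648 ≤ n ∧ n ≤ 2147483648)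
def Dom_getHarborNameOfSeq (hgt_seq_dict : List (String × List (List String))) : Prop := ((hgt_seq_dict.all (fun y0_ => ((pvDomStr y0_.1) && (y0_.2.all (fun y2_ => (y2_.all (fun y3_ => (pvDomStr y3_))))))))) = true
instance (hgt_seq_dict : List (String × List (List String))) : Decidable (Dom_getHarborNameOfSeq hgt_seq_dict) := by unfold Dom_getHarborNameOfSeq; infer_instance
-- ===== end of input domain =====

-- ===== PORT A =====
-- B builds both result maps in ONE pass over the dict (grouping via setdefault) instead of
-- A's dedup pass plus a full rescan of seq2harbor per distinct harbor; objective: faster.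
-- value[0][0]: Python raises IndexError when the value or its first row is empty (excluded by Pre_)
def pvFirstFirst (v : List (List String)) : String :=
  match PySem.List.pyGet? v 0 with
  | some r => match PySem.List.pyGet? r 0 with
    | some c => c
    | none => ""
  | none => ""

def getHarborNameOfSeq (hgt_seq_dict : List (String × List (List String))) : (List (String × String)) × (List (String × List String)) :=
  -- for seq_name in hgt_seq_dict: seq2harbor_dict.update({seq_name: hgt_seq_dict[seq_name][0][0]})
  let seq2harbor_dict : PySem.Dict String String :=
    hgt_seq_dict.foldl (fun d kv => d.insert kv.1 (pvFirstFirst kv.2)) PySem.Dict.empty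
  -- if seq2harbor_dict[seq_name] not in harbor_name_list: harbor_name_list.append(...)
  let harbor_name_list : PySem.Set String :=
    seq2harbor_dict.items.foldl (fun hl kv => PySem.Set.add hl kv.2) PySem.Set.empty
  -- for harbor_name in harbor_name_list: rescan all of seq2harbor_dict, collect ls, update
  let harbor2seq_dict : PySem.Dict String (List String) :=
    harbor_name_list.foldl
      (fun d h =>
        d.insert h
          (seq2harbor_dict.items.foldl
            (fun ls kv => if kv.2 == h then ls ++ [kv.1] else ls) []))
      PySem.Dict.empty
  (seq2harbor_dict.items, harbor2seq_dict.items)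

-- ===== PORT B =====
def getHarborNameOfSeq_alt (hgt_seq_dict : List (String × List (List String))) : (List (String × String)) × (List (String × List String)) :=
  -- one pass: seq2harbor[k] = harbor; harbor2seq.setdefault(harbor, []).append(k)
  -- (setdefault(h, []) + append = modify h [] (· ++ [k]))
  let st :=
    hgt_seq_dict.foldl
      (fun st kv =>
        (st.1.insert kv.1 (pvFirstFirst kv.2),
         st.2.modify (pvFirstFirst kv.2) [] (· ++ [kv.1])))
      ((PySem.Dict.empty : PySem.Dict String String),
       (PySem.Dict.empty : PySem.Dict String (List String)))
  (st.1.items, st.2.items)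

-- ===== PRECONDITION & SPEC =====
-- Pre_ excludes (a) entries whose value list, or its first row, is empty — there A raises
-- IndexError at value[0][0] — and (b) association lists with duplicate keys, which do not
-- encode a Python dict (the argument IS a dict, so (b) excludes no input A accepts).
def Pre_getHarborNameOfSeq (hgt_seq_dict : List (String × List (List String))) : Prop :=
  (hgt_seq_dict.map Prod.fst).Nodup ∧ ∀ kv ∈ hgt_seq_dict, kv.2 ≠ [] ∧ kv.2.headI ≠ []
instance (hgt_seq_dict : List (String × List (List String))) : Decidable (Pre_getHarborNameOfSeq hgt_seq_dict) := by unfold Pre_getHarborNameOfSeq; infer_instance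

def pvWitness_getHarborNameOfSeq : (List (String × List (List String))) :=
  [("s1", [["h1"]]), ("s2", [["h2", "x"], []]), ("s3", [["h1"]])]

def Spec_getHarborNameOfSeq (hgt_seq_dict : List (String × List (List String))) (out : (List (String × String)) × (List (String × List String))) : Prop := out = getHarborNameOfSeq_alt hgt_seq_dict
instance (hgt_seq_dict : List (String × List (List String))) (out : (List (String × String)) × (List (String × List String))) : Decidable (Spec_getHarborNameOfSeq hgt_seq_dict out) := by unfold Spec_getHarborNameOfSeq; infer_instance

-- ===== CLAIM (what is proved, stated in full; the proofs are below) =====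
def Claim_equal_getHarborNameOfSeq : Prop := ∀ (hgt_seq_dict : List (String × List (List String))), Dom_getHarborNameOfSeq hgt_seq_dict → Pre_getHarborNameOfSeq hgt_seq_dict → Spec_getHarborNameOfSeq hgt_seq_dict (getHarborNameOfSeq hgt_seq_dict)

-- ===== LEMMAS AND PROOFS =====

-- A's first loop: inserting the distinct keys of hgt in order just lists them
theorem s2h_items (hgt : List (String × List (List String)))
    (hnd : (hgt.map Prod.fst).Nodup) :
    (hgt.foldl (fun (d : PySem.Dict String String) kv => d.insert kv.1 (pvFirstFirst kv.2)) PySem.Dict.empty).items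
      = hgt.map (fun kv => (kv.1, pvFirstFirst kv.2)) := by
  have h := PySem.Dict.items_foldl_insert_fresh (l := hgt) (k := Prod.fst)
    (v := fun kv => pvFirstFirst kv.2) (d := PySem.Dict.empty)
    (by intro a _; simp) hnd
  simp at h
  exact h

-- A's dedup loop is set(...) in first-occurrence order
theorem hl_eq (ps : List (String × String)) :
    ps.foldl (fun (hl : PySem.Set String) kv => PySem.Set.add hl kv.2) PySem.Set.empty
      = PySem.Set.ofList (ps.map Prod.snd) := by
  rw [← PySem.Set.update_map_eq_foldl_add]
  simp [PySem.Set.update_nil_left, PySem.Set.empty]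

-- A's inner rescan collects the keys mapped to h, in order
theorem group_eq (ps : List (String × String)) (h : String) :
    ps.foldl (fun ls kv => if kv.2 == h then ls ++ [kv.1] else ls) []
      = (ps.filter (fun kv => kv.2 == h)).map Prod.fst := by
  simpa using PySem.List.foldl_append_if (l := ps) (p := fun kv => kv.2 == h) (f := Prod.fst) (acc := [])

-- A's whole third loop, as a map over the distinct harbors
theorem hA_items (ps : List (String × String)) :
    ((ps.foldl (fun (hl : PySem.Set String) kv => PySem.Set.add hl kv.2) PySem.Set.empty).foldl
        (fun (d : PySem.Dict String (List String)) h =>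
          d.insert h (ps.foldl (fun ls kv => if kv.2 == h then ls ++ [kv.1] else ls) []))
        PySem.Dict.empty).items
      = (PySem.Set.ofList (ps.map Prod.snd)).map
          (fun h => (h, (ps.filter (fun kv => kv.2 == h)).map Prod.fst)) := by
  rw [hl_eq]
  have h := PySem.Dict.items_foldl_insert_fresh (l := PySem.Set.ofList (ps.map Prod.snd))
    (k := id) (v := fun h => ps.foldl (fun ls kv => if kv.2 == h then ls ++ [kv.1] else ls) [])
    (d := PySem.Dict.empty)
    (by intro a _; simp) (by simpa using PySem.Set.nodup_ofList (ps.map Prod.snd))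
  simp only [id] at h
  rw [h]
  simp only [group_eq, PySem.Dict.empty, List.nil_append]

-- B's grouping dict: its keys are the harbors in first-occurrence order
theorem hB_keys (hgt : List (String × List (List String))) :
    (hgt.foldl (fun (d : PySem.Dict String (List String)) kv => d.modify (pvFirstFirst kv.2) [] (· ++ [kv.1])) PySem.Dict.empty).keys
      = PySem.Set.ofList (hgt.map (fun kv => pvFirstFirst kv.2)) := by
  have h := PySem.Dict.keys_foldl_modify_key (l := hgt) (key := fun kv => pvFirstFirst kv.2)
    (d0 := []) (f := fun _ kv => (· ++ [kv.1])) (d := PySem.Dict.empty)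
  simpa [PySem.Set.update_nil_left] using h

-- B's grouping dict: entry c holds exactly the keys whose harbor is c, in order
theorem hB_getD (hgt : List (String × List (List String))) (c : String) :
    (hgt.foldl (fun (d : PySem.Dict String (List String)) kv => d.modify (pvFirstFirst kv.2) [] (· ++ [kv.1])) PySem.Dict.empty).getD c []
      = ((hgt.filter (fun kv => pvFirstFirst kv.2 == c)).map Prod.fst) := by
  have hm : hgt.foldl (fun (d : PySem.Dict String (List String)) kv => d.modify (pvFirstFirst kv.2) [] (· ++ [kv.1])) PySem.Dict.empty
      = (hgt.map (fun kv => (pvFirstFirst kv.2, kv.1))).foldl (fun d p => d.modify p.1 [] (· ++ [p.2])) PySem.Dict.empty := by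
    rw [List.foldl_map]
  rw [hm, PySem.Dict.getD_foldl_modify_append (l := hgt.map (fun kv => (pvFirstFirst kv.2, kv.1)))
    (d := PySem.Dict.empty) (c := c)]
  simp [List.filter_map, Function.comp_def]

theorem getHarborNameOfSeq_eq (hgt : List (String × List (List String)))
    (hnd : (hgt.map Prod.fst).Nodup) :
    getHarborNameOfSeq hgt = getHarborNameOfSeq_alt hgt := by
  dsimp only [getHarborNameOfSeq, getHarborNameOfSeq_alt]
  rw [PySem.List.foldl_prod_mk (fun (d : PySem.Dict String String) kv => d.insert kv.1 (pvFirstFirst kv.2))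
    (fun (d : PySem.Dict String (List String)) kv => d.modify (pvFirstFirst kv.2) [] (· ++ [kv.1])) hgt _ _]
  refine Prod.ext rfl ?_
  have hD : (hgt.foldl (fun (d : PySem.Dict String (List String)) kv => d.modify (pvFirstFirst kv.2) [] (· ++ [kv.1])) PySem.Dict.empty).keys
      = PySem.Set.ofList (hgt.map (fun kv => pvFirstFirst kv.2)) := hB_keys hgt
  rw [hA_items, s2h_items hgt hnd,
    PySem.Dict.items_eq_map_keys _ (by rw [hD]; exact PySem.Set.nodup_ofList _) ([] : List String),
    hD]
  rw [List.map_map]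
  refine List.map_congr_left ?_
  intro h _
  rw [hB_getD]
  simp [List.filter_map, Function.comp_def]

-- ===== VERDICT (by name: the statement is the Claim_ definition above) =====
theorem getHarborNameOfSeq_spec : Claim_equal_getHarborNameOfSeq := by
  intro hgt _ hpre
  unfold Spec_getHarborNameOfSeq
  exact getHarborNameOfSeq_eq hgt hpre.1
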